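-- pv_equiv track=rewrite | github.com/ptitbroussou/HW_QCNN | toolbox.py | Pyramidal_Order_RBS_gates
-- ===== SOURCE A (Python) =====
-- def Pyramidal_Order_RBS_gates(nbr_qubits, first_RBS=0):
--     """ This function gives the structure of each inner layer in the pyramidal
--     quantum neural network. List_order gives the qubit link to each theta and
--     List_layer_index gives the list of the theta for each inner layer. """
--     List_layers, List_order, List_layer_index = [], [], []
--     index_RBS = first_RBS
--     # Beginning of the pyramid
--     for i in range(nbr_qubits // 2):
--         list, list_index = [], []
--         for j in range(i + 1):
--             if (i * 2 < (nbr_qubits - 1)):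
--                 list.append(j * 2)
--                 list_index.append(index_RBS)
--                 index_RBS += 1
--         if (len(list) > 0):
--             List_layers.append(list)
--             List_layer_index.append(list_index)
--         list, list_index = [], []
--         for j in range(i + 1):
--             if (i * 2 + 1 < (nbr_qubits - 1)):
--                 list.append(j * 2 + 1)
--                 list_index.append(index_RBS)
--                 index_RBS += 1
--         if (len(list) > 0):
--             List_layers.append(list)
--             List_layer_index.append(list_index)
--     # End of the pyramid
--     for i in range(len(List_layers) - 2, -1, -1):
--         List_layers.append(List_layers[i])
--         list_index = []
--         for j in range(len(List_layers[i])):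
--             list_index.append(index_RBS)
--             index_RBS += 1
--         List_layer_index.append(list_index)
--     # Deconcatenate:
--     for i, layer in enumerate(List_layers):
--         List_order += layer
--     return (List_order, List_layer_index)
-- ===== SOURCE B (Python) =====
-- def Pyramidal_Order_RBS_gates(nbr_qubits, first_RBS=0):
--     # Closed form: layer t of the full pyramid is determined arithmetically
--     # (no building-then-mirroring): ascending layer s has parity s % 2 and
--     # size s // 2 + 1; the descending half reuses s = 2*L0 - 2 - t.
--     m = nbr_qubits // 2
--     if m <= 0:
--         return ([], [])
--     L0 = 2 * m - 1 if nbr_qubits % 2 == 0 else 2 * m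
--     order, layer_index, k = [], [], first_RBS
--     for t in range(2 * L0 - 1):
--         s = t if t < L0 else 2 * L0 - 2 - t
--         size = s // 2 + 1
--         start = s % 2
--         order += [start + 2 * j for j in range(size)]
--         layer_index.append([k + j for j in range(size)])
--         k += size
--     return (order, layer_index)
-- ===== Notes on version B (the rewrite author's own statement) =====
-- stated objective: alternative
-- what changed: B never builds, mirrors or re-reads the layer structure: it derives each layer of the full pyramid directly from a closed-form reflected layer number s (start parity s % 2, size s // 2 + 1) and emits order and index chunks in one single loop, replacing A's three-stage build/mirror-with-indexing/flatten construction.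
import Mathlib
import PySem

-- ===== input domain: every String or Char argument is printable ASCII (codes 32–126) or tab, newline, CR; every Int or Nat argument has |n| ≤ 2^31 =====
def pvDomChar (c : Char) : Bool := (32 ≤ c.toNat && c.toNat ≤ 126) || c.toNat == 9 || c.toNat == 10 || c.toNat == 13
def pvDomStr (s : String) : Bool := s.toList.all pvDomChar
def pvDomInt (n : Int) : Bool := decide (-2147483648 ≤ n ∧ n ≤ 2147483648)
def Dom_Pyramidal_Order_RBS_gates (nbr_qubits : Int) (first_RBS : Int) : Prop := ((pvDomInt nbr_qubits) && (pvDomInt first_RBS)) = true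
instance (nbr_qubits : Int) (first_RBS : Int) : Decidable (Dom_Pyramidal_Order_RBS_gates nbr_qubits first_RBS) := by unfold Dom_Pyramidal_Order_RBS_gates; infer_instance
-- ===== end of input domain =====

-- B replaces A's build-then-mirror construction by a closed-form description of each layer
-- (layer t has start parity s % 2 and size s // 2 + 1 with s the reflected layer number),
-- generated in one single loop (objective: alternative).

-- ===== PORT A =====
-- inner loop 'for j in range(i+1)' of the even half (state: list, list_index, index_RBS)
def pyrA1_inner (n i : Int) (p : List Int × List Int × Int) (j : Int) : List Int × List Int × Int :=
  if i * 2 < n - 1 then (p.1 ++ [j * 2], p.2.1 ++ [p.2.2], p.2.2 + 1) else p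

-- inner loop of the odd half
def pyrA1_inner2 (n i : Int) (p : List Int × List Int × Int) (j : Int) : List Int × List Int × Int :=
  if i * 2 + 1 < n - 1 then (p.1 ++ [j * 2 + 1], p.2.1 ++ [p.2.2], p.2.2 + 1) else p

-- one iteration of 'for i in range(nbr_qubits // 2)' (state: List_layers, List_layer_index, index_RBS)
def pyrA1_step (n : Int) (st : List (List Int) × List (List Int) × Int) (i : Int) :
    List (List Int) × List (List Int) × Int :=
  let r1 := (PySem.List.pyRange 0 (i + 1) 1).foldl (pyrA1_inner n i) ([], [], st.2.2)
  let st1 : List (List Int) × List (List Int) × Int :=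
    if 0 < r1.1.length then (st.1 ++ [r1.1], st.2.1 ++ [r1.2.1], r1.2.2) else (st.1, st.2.1, r1.2.2)
  let r2 := (PySem.List.pyRange 0 (i + 1) 1).foldl (pyrA1_inner2 n i) ([], [], st1.2.2)
  if 0 < r2.1.length then (st1.1 ++ [r2.1], st1.2.1 ++ [r2.2.1], r2.2.2) else (st1.1, st1.2.1, r2.2.2)

-- one iteration of 'for i in range(len(List_layers) - 2, -1, -1)';
-- List_layers[i] is always in range here (the loop only appends past i), so pyGetD is exact
def pyrA2_step (st : List (List Int) × List (List Int) × Int) (i : Int) :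
    List (List Int) × List (List Int) × Int :=
  let layer := PySem.List.pyGetD st.1 i []
  let r := (PySem.List.pyRange 0 (layer.length : Int) 1).foldl
      (fun (p : List Int × Int) _ => (p.1 ++ [p.2], p.2 + 1)) ([], st.2.2)
  (st.1 ++ [layer], st.2.1 ++ [r.1], r.2)

def Pyramidal_Order_RBS_gates (nbr_qubits : Int) (first_RBS : Int) : List Int × List (List Int) :=
  let st1 := (PySem.List.pyRange 0 (PySem.Int.floordiv nbr_qubits 2) 1).foldl
      (pyrA1_step nbr_qubits) ([], [], first_RBS)
  let st2 := (PySem.List.pyRange ((st1.1.length : Int) - 2) (-1) (-1)).foldl pyrA2_step st1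
  (st2.1.foldl (fun acc layer => acc ++ layer) [], st2.2.1)

-- ===== PORT B =====
-- one iteration of B's single loop over layer numbers t (state: order, layer_index, k)
def pyrB_step (L0 : Int) (p : List Int × List (List Int) × Int) (t : Int) :
    List Int × List (List Int) × Int :=
  let s := if t < L0 then t else 2 * L0 - 2 - t
  let size := PySem.Int.floordiv s 2 + 1
  let start := PySem.Int.mod s 2
  (p.1 ++ (PySem.List.pyRange 0 size 1).map (fun j => start + 2 * j),
   p.2.1 ++ [(PySem.List.pyRange 0 size 1).map (fun j => p.2.2 + j)],
   p.2.2 + size)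

def Pyramidal_Order_RBS_gates_alt (nbr_qubits : Int) (first_RBS : Int) : List Int × List (List Int) :=
  let m := PySem.Int.floordiv nbr_qubits 2
  if m ≤ 0 then ([], [])
  else
    let L0 := if PySem.Int.mod nbr_qubits 2 == 0 then 2 * m - 1 else 2 * m
    let st := (PySem.List.pyRange 0 (2 * L0 - 1) 1).foldl (pyrB_step L0) ([], [], first_RBS)
    (st.1, st.2.1)

-- ===== PRECONDITION & SPEC =====
def Spec_Pyramidal_Order_RBS_gates (nbr_qubits : Int) (first_RBS : Int) (out : List Int × List (List Int)) : Prop := out = Pyramidal_Order_RBS_gates_alt nbr_qubits first_RBS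
instance (nbr_qubits : Int) (first_RBS : Int) (out : List Int × List (List Int)) : Decidable (Spec_Pyramidal_Order_RBS_gates nbr_qubits first_RBS out) := by unfold Spec_Pyramidal_Order_RBS_gates; infer_instance

-- ===== CLAIM (what is proved, stated in full; the proofs are below) =====
def Claim_equal_Pyramidal_Order_RBS_gates : Prop := ∀ (nbr_qubits : Int) (first_RBS : Int), Dom_Pyramidal_Order_RBS_gates nbr_qubits first_RBS → Spec_Pyramidal_Order_RBS_gates nbr_qubits first_RBS (Pyramidal_Order_RBS_gates nbr_qubits first_RBS)

-- ===== LEMMAS AND PROOFS =====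

-- the ascending layer with layer number s (s ≥ 0): parity s % 2, size s // 2 + 1
def ascL (s : Int) : List Int :=
  (PySem.List.pyRange 0 (PySem.Int.floordiv s 2 + 1) 1).map (fun j => PySem.Int.mod s 2 + 2 * j)

-- proof-side helper: A's phase 1 without the numbering (layers only)
def pyrLayersStep (n : Int) (acc : List (List Int)) (i : Int) : List (List Int) :=
  let acc := if 2 * i < n - 1 then acc ++ [(PySem.List.pyRange 0 (i + 1) 1).map (fun j => 2 * j)] else acc
  if 2 * i + 1 < n - 1 then acc ++ [(PySem.List.pyRange 0 (i + 1) 1).map (fun j => 2 * j + 1)] else acc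

-- reference numbering: consecutive pyRanges, one per layer
def numberFrom : Int → List (List Int) → List (List Int)
  | _, [] => []
  | k, l :: ls => PySem.List.pyRange k (k + (l.length : Int)) 1 :: numberFrom (k + (l.length : Int)) ls

def totLen (ls : List (List Int)) : Int := ((ls.map List.length).sum : Int)

theorem totLen_append (xs ys : List (List Int)) : totLen (xs ++ ys) = totLen xs + totLen ys := by
  simp [totLen]

theorem totLen_cons (l : List Int) (ls : List (List Int)) :
    totLen (l :: ls) = (l.length : Int) + totLen ls := by simp [totLen]

theorem numberFrom_append (k : Int) (xs ys : List (List Int)) :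
    numberFrom k (xs ++ ys) = numberFrom k xs ++ numberFrom (k + totLen xs) ys := by
  induction xs generalizing k with
  | nil => simp [numberFrom, totLen]
  | cons l xs ih =>
    simp [numberFrom, ih, totLen, List.map_cons, List.sum_cons]
    ring_nf

-- generic "append element and count" inner loop
theorem append_count_fold {α : Type} (g : α → Int) (js : List α) (a b : List Int) (k : Int) :
    js.foldl (fun p j => (p.1 ++ [g j], p.2.1 ++ [p.2.2], p.2.2 + 1)) ((a, b, k) : List Int × List Int × Int)
      = (a ++ js.map g, b ++ PySem.List.pyRange k (k + (js.length : Int)) 1, k + (js.length : Int)) := by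
  induction js generalizing a b k with
  | nil => simp [PySem.List.pyRange_one_eq_nil (by omega : (k : Int) ≤ k)]
  | cons j js ih =>
    simp only [List.foldl_cons, List.map_cons, List.length_cons]
    rw [ih]
    push_cast
    rw [PySem.List.pyRange_one_cons (by omega : k < k + ((js.length : Int) + 1))]
    have harg : k + 1 + (js.length : Int) = k + ((js.length : Int) + 1) := by ring
    rw [harg]
    simp [List.append_assoc]

-- counting-only inner loop (phase-2 index loop of A)
theorem count_fold {α : Type} (js : List α) (a : List Int) (k : Int) :
    js.foldl (fun (p : List Int × Int) _ => (p.1 ++ [p.2], p.2 + 1)) (a, k)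
      = (a ++ PySem.List.pyRange k (k + (js.length : Int)) 1, k + (js.length : Int)) := by
  induction js generalizing a k with
  | nil => simp [PySem.List.pyRange_one_eq_nil (by omega : (k : Int) ≤ k)]
  | cons j js ih =>
    simp only [List.foldl_cons, List.length_cons]
    rw [ih]
    push_cast
    rw [PySem.List.pyRange_one_cons (by omega : k < k + ((js.length : Int) + 1))]
    have harg : k + 1 + (js.length : Int) = k + ((js.length : Int) + 1) := by ring
    rw [harg]
    simp [List.append_assoc]

theorem numberFrom_singleton (k : Int) (l : List Int) :
    numberFrom k [l] = [PySem.List.pyRange k (k + (l.length : Int)) 1] := rfl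

theorem totLen_singleton (l : List Int) : totLen [l] = (l.length : Int) := by simp [totLen]

theorem pyRange_congr {a a' b b' : Int} (ha : a = a') (hb : b = b') :
    PySem.List.pyRange a b 1 = PySem.List.pyRange a' b' 1 := by rw [ha, hb]

-- a fold that never changes its state
theorem foldl_const {α β : Type} (js : List α) (s : β) : js.foldl (fun p _ => p) s = s := by
  induction js with
  | nil => rfl
  | cons j js ih => simpa using ih

theorem innerA1_true (n i : Int) (hi : 0 ≤ i) (h : i * 2 < n - 1) (k : Int) :
    (PySem.List.pyRange 0 (i + 1) 1).foldl (pyrA1_inner n i) ([], [], k)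
      = ((PySem.List.pyRange 0 (i + 1) 1).map (fun j => j * 2),
         PySem.List.pyRange k (k + (i + 1)) 1, k + (i + 1)) := by
  unfold pyrA1_inner
  simp only [h, ite_true, if_pos]
  rw [append_count_fold (fun j => j * 2), PySem.List.length_pyRange_one,
    show (((i + 1 - 0).toNat : Int)) = i + 1 from by omega]
  simp

theorem innerA1_false (n i : Int) (h : ¬ (i * 2 < n - 1)) (k : Int) :
    (PySem.List.pyRange 0 (i + 1) 1).foldl (pyrA1_inner n i) ([], [], k)
      = ([], [], k) := by
  unfold pyrA1_inner
  simp only [h, ite_false, if_neg, not_false_iff]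
  exact foldl_const _ _

theorem innerA2_true (n i : Int) (hi : 0 ≤ i) (h : i * 2 + 1 < n - 1) (k : Int) :
    (PySem.List.pyRange 0 (i + 1) 1).foldl (pyrA1_inner2 n i) ([], [], k)
      = ((PySem.List.pyRange 0 (i + 1) 1).map (fun j => j * 2 + 1),
         PySem.List.pyRange k (k + (i + 1)) 1, k + (i + 1)) := by
  unfold pyrA1_inner2
  simp only [h, ite_true, if_pos]
  rw [append_count_fold (fun j => j * 2 + 1), PySem.List.length_pyRange_one,
    show (((i + 1 - 0).toNat : Int)) = i + 1 from by omega]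
  simp

theorem innerA2_false (n i : Int) (h : ¬ (i * 2 + 1 < n - 1)) (k : Int) :
    (PySem.List.pyRange 0 (i + 1) 1).foldl (pyrA1_inner2 n i) ([], [], k)
      = ([], [], k) := by
  unfold pyrA1_inner2
  simp only [h, ite_false, if_neg, not_false_iff]
  exact foldl_const _ _

-- A's phase-1 body simulates the layers-only body with the numbering invariant
theorem step_sim (n i : Int) (hi : 0 ≤ i) (base : List (List Int)) (f : Int) :
    pyrA1_step n (base, numberFrom f base, f + totLen base) i
      = (pyrLayersStep n base i, numberFrom f (pyrLayersStep n base i),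
         f + totLen (pyrLayersStep n base i)) := by
  have hlen : ((PySem.List.pyRange 0 (i + 1) 1).length : Int) = i + 1 := by
    rw [PySem.List.length_pyRange_one]; omega
  have hpos : 0 < (PySem.List.pyRange 0 (i + 1) 1).length := by omega
  have heq1 : (PySem.List.pyRange 0 (i + 1) 1).map (fun j => j * 2)
      = (PySem.List.pyRange 0 (i + 1) 1).map (fun j => 2 * j) := by
    simp [Int.mul_comm]
  have heq2 : (PySem.List.pyRange 0 (i + 1) 1).map (fun j => j * 2 + 1)
      = (PySem.List.pyRange 0 (i + 1) 1).map (fun j => 2 * j + 1) := by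
    simp [Int.mul_comm]
  have hc1 : (2 * i < n - 1) = (i * 2 < n - 1) := by rw [Int.mul_comm]
  have hc2 : (2 * i + 1 < n - 1) = (i * 2 + 1 < n - 1) := by rw [Int.mul_comm]
  by_cases c1 : i * 2 < n - 1
  · by_cases c2 : i * 2 + 1 < n - 1
    · simp only [pyrA1_step, pyrLayersStep, hc1, hc2, c1, c2, ite_true,
        innerA1_true n i hi c1, innerA2_true n i hi c2]
      simp [hi, hpos, hlen, heq1, heq2, numberFrom_append, numberFrom_singleton,
        totLen_append, totLen_singleton]
      have hlen' : ((PySem.List.pyRange 0 (1 + i) 1).length : Int) = i + 1 := by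
        rw [show (1 : Int) + i = i + 1 from by ring]; exact hlen
      simp only [List.length_map, hlen, numberFrom, totLen, List.map_cons, List.map_nil,
        List.sum_cons, List.sum_nil]
      push_cast
      ring_nf
      all_goals first
        | (simp only [hlen', true_and]; first | ring | trivial | rfl)
        | ring | trivial | rfl
        | (rw [show max (1 + i) (0 : Int) = 1 + i from by omega]
           exact ⟨pyRange_congr (by ring) (by ring), by ring⟩)
    · simp only [pyrA1_step, pyrLayersStep, hc1, hc2, c1, c2, ite_true, ite_false,
        innerA1_true n i hi c1, innerA2_false n i c2]
      simp [hi, hpos, hlen, heq1, numberFrom_append, numberFrom_singleton,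
        totLen_append, totLen_singleton]
      have hlen' : ((PySem.List.pyRange 0 (1 + i) 1).length : Int) = i + 1 := by
        rw [show (1 : Int) + i = i + 1 from by ring]; exact hlen
      simp only [List.length_map, hlen, numberFrom, totLen, List.map_cons, List.map_nil,
        List.sum_cons, List.sum_nil]
      push_cast
      ring_nf
      all_goals first
        | (simp only [hlen', true_and]; first | ring | trivial | rfl)
        | ring | trivial | rfl
        | (rw [show max (1 + i) (0 : Int) = 1 + i from by omega]
           exact ⟨pyRange_congr (by ring) (by ring), by ring⟩)
  · have c2 : ¬ (i * 2 + 1 < n - 1) := by omega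
    simp only [pyrA1_step, pyrLayersStep, hc1, hc2, c1, c2, ite_false,
      innerA1_false n i c1, innerA2_false n i c2]
    simp

-- pyRange with a possibly negative integer bound
theorem pyRange_toNat (m : Int) :
    PySem.List.pyRange 0 m 1 = PySem.List.pyRange 0 ((m.toNat : Nat) : Int) 1 := by
  rcases (by omega : 0 ≤ m ∨ m < 0) with h | h
  · rw [Int.toNat_of_nonneg h]
  · rw [PySem.List.pyRange_one_eq_nil (by omega), PySem.List.pyRange_one_eq_nil (by omega)]

-- phase 1: A's fold carries the layers-only fold together with its consecutive numbering
theorem phase1 (n f : Int) (t : Nat) :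
    (PySem.List.pyRange 0 (t : Int) 1).foldl (pyrA1_step n) ([], [], f)
      = ((PySem.List.pyRange 0 (t : Int) 1).foldl (pyrLayersStep n) [],
         numberFrom f ((PySem.List.pyRange 0 (t : Int) 1).foldl (pyrLayersStep n) []),
         f + totLen ((PySem.List.pyRange 0 (t : Int) 1).foldl (pyrLayersStep n) [])) := by
  induction t with
  | zero => simp [PySem.List.pyRange_one_eq_nil (by omega : (0:Int) ≤ 0), numberFrom, totLen]
  | succ t ih =>
    rw [show (((t + 1 : Nat)) : Int) = (t : Int) + 1 by push_cast; ring,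
      PySem.List.pyRange_one_succ_right (by omega : (0:Int) ≤ (t : Int))]
    simp only [List.foldl_append, List.foldl_cons, List.foldl_nil]
    rw [ih, step_sim n (t : Int) (by omega)]

-- phase 2: each iteration copies a layer of the fixed prefix and numbers it
theorem phase2 (base : List (List Int)) (is : List Int)
    (h : ∀ i ∈ is, 0 ≤ i ∧ i < (base.length : Int)) (extra li : List (List Int)) (idx : Int) :
    is.foldl pyrA2_step (base ++ extra, li, idx)
      = (base ++ (extra ++ is.map (fun i => base.getD i.toNat [])),
         li ++ numberFrom idx (is.map (fun i => base.getD i.toNat [])),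
         idx + totLen (is.map (fun i => base.getD i.toNat []))) := by
  induction is generalizing extra li idx with
  | nil => simp [numberFrom, totLen]
  | cons i is ih =>
    obtain ⟨h0, h1⟩ := h i (List.mem_cons_self ..)
    have hlt : i.toNat < base.length := by omega
    have hget : PySem.List.pyGetD (base ++ extra) i ([] : List Int) = base.getD i.toNat [] := by
      rw [PySem.List.pyGetD_eq_getElem (base ++ extra) ([] : List Int) h0
        (by simp only [List.length_append]; push_cast; omega)]
      rw [List.getElem_append_left hlt, List.getD_eq_getElem _ _ hlt]
    simp only [List.foldl_cons, pyrA2_step, hget, count_fold]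
    rw [show base ++ extra ++ [base.getD i.toNat []] = base ++ (extra ++ [base.getD i.toNat []]) by
      simp [List.append_assoc]]
    rw [ih (fun j hj => h j (List.mem_cons_of_mem _ hj))]
    simp only [List.map_cons, numberFrom, totLen_append, totLen_singleton]
    rw [show (PySem.List.pyRange 0 ((base.getD i.toNat []).length : Int) 1).length
        = (base.getD i.toNat []).length by rw [PySem.List.length_pyRange_one]; omega]
    simp [List.append_assoc, numberFrom_append, totLen_append, totLen_singleton, totLen_cons]
    all_goals first | ring | trivial | rfl | omega

-- indices 0..k-1 pick out the first k layers
theorem map_getD_take (base : List (List Int)) (k : Nat) (hk : k ≤ base.length) :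
    (PySem.List.pyRange 0 (k : Int) 1).map (fun i => base.getD i.toNat []) = base.take k := by
  induction k with
  | zero => simp [PySem.List.pyRange_one_eq_nil (by omega : (0:Int) ≤ 0)]
  | succ k ih =>
    rw [show (((k + 1 : Nat)) : Int) = (k : Int) + 1 by push_cast; ring,
      PySem.List.pyRange_one_succ_right (by omega : (0:Int) ≤ (k : Int))]
    simp only [List.map_append, List.map_cons, List.map_nil]
    rw [ih (by omega), List.take_succ]
    have : base[k]? = some base[k] := List.getElem?_eq_getElem (by omega)
    simp [this, List.getD_eq_getElem _ _ (by omega : k < base.length), Int.toNat_natCast]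

-- the mirror index loop of A reads off layers[:-1] reversed
theorem mirror_map (base : List (List Int)) :
    (PySem.List.pyRange ((base.length : Int) - 2) (-1) (-1)).map (fun i => base.getD i.toNat [])
      = base.dropLast.reverse := by
  rw [PySem.List.pyRange_neg_one_eq_reverse]
  rcases Nat.eq_zero_or_pos base.length with h0 | hpos
  · have : base = [] := List.eq_nil_of_length_eq_zero h0
    subst this
    simp [PySem.List.pyRange_one_eq_nil (by omega : ((0:Int) - 2 + 1) ≤ -1 + 1)]
  · rw [show (-1 + 1 : Int) = 0 by ring, show ((base.length : Int) - 2 + 1) = ((base.length - 1 : Nat) : Int) by omega]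
    rw [List.map_reverse, map_getD_take base (base.length - 1) (by omega)]
    rw [List.dropLast_eq_take]

-- ascL at even / odd layer numbers is exactly what A's phase 1 appends
theorem ascL_even (i : Int) (hi : 0 ≤ i) :
    ascL (2 * i) = (PySem.List.pyRange 0 (i + 1) 1).map (fun j => 2 * j) := by
  unfold ascL
  rw [PySem.Int.floordiv_eq_ediv_of_pos (by omega), PySem.Int.mod_eq_emod_of_pos (by omega)]
  rw [show (2 * i) / 2 = i from by omega, show (2 * i) % 2 = 0 from by omega]
  simp

theorem ascL_odd (i : Int) (hi : 0 ≤ i) :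
    ascL (2 * i + 1) = (PySem.List.pyRange 0 (i + 1) 1).map (fun j => 2 * j + 1) := by
  unfold ascL
  rw [PySem.Int.floordiv_eq_ediv_of_pos (by omega), PySem.Int.mod_eq_emod_of_pos (by omega)]
  rw [show (2 * i + 1) / 2 = i from by omega, show (2 * i + 1) % 2 = 1 from by omega]
  simp [Int.add_comm]

-- length of an ascending layer
theorem ascL_length (s : Int) (hs : 0 ≤ s) :
    ((ascL s).length : Int) = PySem.Int.floordiv s 2 + 1 := by
  unfold ascL
  rw [List.length_map, PySem.List.length_pyRange_one,
    PySem.Int.floordiv_eq_ediv_of_pos (by omega : (0:Int) < 2)]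
  omega

-- building the layers while both halves are present: two ascL layers per iteration
theorem buildAsc (n : Int) (t : Nat) (h : ∀ i : Nat, i < t → 2 * (i : Int) + 1 < n - 1)
    (acc : List (List Int)) :
    (PySem.List.pyRange 0 (t : Int) 1).foldl (pyrLayersStep n) acc
      = acc ++ (PySem.List.pyRange 0 (2 * (t : Int)) 1).map ascL := by
  induction t generalizing acc with
  | zero => simp [PySem.List.pyRange_one_eq_nil (by omega : (0:Int) ≤ 0)]
  | succ t ih =>
    rw [show (((t + 1 : Nat)) : Int) = (t : Int) + 1 by push_cast; ring,
      PySem.List.pyRange_one_succ_right (by omega : (0:Int) ≤ (t : Int))]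
    simp only [List.foldl_append, List.foldl_cons, List.foldl_nil]
    rw [ih (fun i hi => h i (by omega))]
    have h1 : 2 * (t : Int) + 1 < n - 1 := h t (by omega)
    have h2 : 2 * (t : Int) < n - 1 := by omega
    rw [show 2 * ((t : Int) + 1) = (2 * (t : Int) + 1) + 1 by ring,
      PySem.List.pyRange_one_succ_right (by omega : (0:Int) ≤ 2 * (t : Int) + 1),
      PySem.List.pyRange_one_succ_right (by omega : (0:Int) ≤ 2 * (t : Int))]
    simp only [pyrLayersStep, h1, h2, ite_true, List.map_append, List.map_cons, List.map_nil]
    rw [ascL_even (t : Int) (by omega), ascL_odd (t : Int) (by omega)]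
    simp [List.append_assoc]

-- the layers A builds are the closed-form ascending layers 0 .. L0-1
theorem base_eq (n : Int) (m : Int) (hm : m = PySem.Int.floordiv n 2) (hm1 : 1 ≤ m) (L0 : Int)
    (hL0 : L0 = if PySem.Int.mod n 2 == 0 then 2 * m - 1 else 2 * m) :
    (PySem.List.pyRange 0 (m.toNat : Int) 1).foldl (pyrLayersStep n) []
      = (PySem.List.pyRange 0 L0 1).map ascL := by
  have hdiv : m = n / 2 := by rw [hm, PySem.Int.floordiv_eq_ediv_of_pos (by omega)]
  have hmod : PySem.Int.mod n 2 = n % 2 := PySem.Int.mod_eq_emod_of_pos (by omega)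
  rw [show ((m.toNat : Nat) : Int) = ((m - 1).toNat : Int) + 1 from by omega,
    show (((m - 1).toNat : Int) + 1) = (((m - 1).toNat + 1 : Nat) : Int) from by push_cast; ring]
  have hmt : (((m - 1).toNat : Nat) : Int) = m - 1 := by omega
  rcases Int.even_or_odd n with ⟨c, hc⟩ | ⟨c, hc⟩
  · -- n even: last iteration appends only the even layer
    have hme : n = 2 * m := by omega
    have hL0' : L0 = 2 * m - 1 := by
      rw [hL0, hmod]; simp [show n % 2 = 0 from by omega]
    rw [show (((m - 1).toNat + 1 : Nat) : Int) = ((m-1).toNat : Int) + 1 from by push_cast; ring,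
      PySem.List.pyRange_one_succ_right (by omega : (0:Int) ≤ ((m-1).toNat : Int))]
    simp only [List.foldl_append, List.foldl_cons, List.foldl_nil]
    rw [buildAsc n (m-1).toNat (fun i hi => by omega) []]
    simp only [List.nil_append, hmt]
    have hc1 : 2 * (m - 1) < n - 1 := by omega
    have hc2 : ¬ (2 * (m - 1) + 1 < n - 1) := by omega
    simp only [pyrLayersStep, hc1, hc2, ite_true, ite_false]
    rw [hL0', show 2 * m - 1 = 2 * (m - 1) + 1 from by ring,
      PySem.List.pyRange_one_succ_right (by omega : (0:Int) ≤ 2 * (m - 1))]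
    rw [List.map_append, List.map_cons, List.map_nil,
      ascL_even (m - 1) (by omega), show m - 1 + 1 = m from by ring]
  · -- n odd: every iteration appends both layers
    have hmo : n = 2 * m + 1 := by omega
    have hL0' : L0 = 2 * m := by
      rw [hL0, hmod]; simp [show n % 2 = 1 from by omega]
    rw [buildAsc n ((m-1).toNat + 1) (fun i hi => by omega) []]
    rw [hL0']
    simp only [List.nil_append]
    congr 2
    push_cast
    omega

-- B's numbering chunk is a shifted pyRange
theorem map_add_pyRange (k sz : Int) :
    (PySem.List.pyRange 0 sz 1).map (fun j => k + j) = PySem.List.pyRange k (k + sz) 1 := by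
  rw [PySem.List.pyRange_one 0 sz, PySem.List.pyRange_one k (k + sz), List.map_map,
    show k + sz - k = sz - 0 from by ring]
  simp

-- B's single loop produces concatenated closed-form layers and their consecutive numbering
theorem B_fold (L0 : Int) (ts : List Int) (hts : ∀ t ∈ ts, 0 ≤ (if t < L0 then t else 2 * L0 - 2 - t))
    (ord : List Int) (li : List (List Int)) (k : Int) :
    ts.foldl (pyrB_step L0) (ord, li, k)
      = (ord ++ (ts.map (fun t => ascL (if t < L0 then t else 2 * L0 - 2 - t))).foldl (fun a l => a ++ l) [],
         li ++ numberFrom k (ts.map (fun t => ascL (if t < L0 then t else 2 * L0 - 2 - t))),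
         k + totLen (ts.map (fun t => ascL (if t < L0 then t else 2 * L0 - 2 - t)))) := by
  induction ts generalizing ord li k with
  | nil => simp [numberFrom, totLen]
  | cons t ts ih =>
    have hs : 0 ≤ (if t < L0 then t else 2 * L0 - 2 - t) := hts t (List.mem_cons_self ..)
    simp only [List.foldl_cons, pyrB_step]
    rw [ih (fun u hu => hts u (List.mem_cons_of_mem _ hu))]
    set s := (if t < L0 then t else 2 * L0 - 2 - t) with hsdef
    have hA : (PySem.List.pyRange 0 (PySem.Int.floordiv s 2 + 1) 1).map
        (fun j => PySem.Int.mod s 2 + 2 * j) = ascL s := rfl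
    have hlen := ascL_length s hs
    simp only [List.map_cons, numberFrom, totLen_cons, hA]
    rw [map_add_pyRange k (PySem.Int.floordiv s 2 + 1), show k + (PySem.Int.floordiv s 2 + 1)
        = k + ((ascL s).length : Int) from by rw [hlen]]
    simp only [Prod.mk.injEq]
    refine ⟨?_, ?_, ?_⟩
    · -- order components: acc ++ flatten with moved head
      have haux : ∀ (ls : List (List Int)) (a b : List Int),
          ls.foldl (fun a l => a ++ l) (a ++ b) = a ++ ls.foldl (fun a l => a ++ l) b := by
        intro ls
        induction ls with
        | nil => intro a b; rfl
        | cons l ls ih2 => intro a b; simp only [List.foldl_cons, List.append_assoc]; exact ih2 a (b ++ l)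
      simp only [List.foldl_cons, List.nil_append, ← hsdef, List.append_assoc]
      congr 1
      have h3 := haux (ts.map fun t => ascL (if t < L0 then t else 2 * L0 - 2 - t)) (ascL s) []
      simpa using h3.symm
    · simp only [← hsdef]
      simp [List.append_assoc]
    · simp only [← hsdef]
      ring

-- reflection: mapping t ↦ g (c - t) over an ascending range is a reversed map of g
theorem map_reflect (g : Int → List Int) (d : Nat) (a c : Int) :
    (PySem.List.pyRange a (a + (d : Int)) 1).map (fun t => g (c - t))
      = ((PySem.List.pyRange (c - a - (d : Int) + 1) (c - a + 1) 1).map g).reverse := by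
  induction d generalizing a with
  | zero =>
    simp [PySem.List.pyRange_one_eq_nil (by omega : a + ((0:Nat) : Int) ≤ a),
      PySem.List.pyRange_one_eq_nil (by omega : c - a + 1 ≤ c - a - ((0:Nat) : Int) + 1)]
  | succ d ih =>
    rw [show a + (((d + 1 : Nat)) : Int) = (a + 1) + (d : Int) from by push_cast; ring,
      PySem.List.pyRange_one_cons (by omega : a < (a + 1) + (d : Int)),
      PySem.List.pyRange_one_succ_right (by omega : c - a - (((d + 1 : Nat)) : Int) + 1 ≤ c - a)]
    simp only [List.map_cons, List.map_append, List.map_nil, List.reverse_append]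
    rw [ih (a + 1)]
    simp only [List.reverse_cons, List.reverse_nil, List.nil_append]
    have : c - (a + 1) - (d : Int) + 1 = c - a - (((d + 1 : Nat)) : Int) + 1 := by push_cast; ring
    have h2 : c - (a + 1) + 1 = c - a := by ring
    rw [this, h2]
    simp

-- the full layer-number sequence of B splits into ascending and mirrored halves
theorem layers_split (L0 : Int) (hL0 : 1 ≤ L0) :
    (PySem.List.pyRange 0 (2 * L0 - 1) 1).map (fun t => ascL (if t < L0 then t else 2 * L0 - 2 - t))
      = (PySem.List.pyRange 0 L0 1).map ascL
        ++ ((PySem.List.pyRange 0 L0 1).map ascL).dropLast.reverse := by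
  rw [PySem.List.pyRange_one_append 0 L0 (2 * L0 - 1) (by omega) (by omega), List.map_append]
  congr 1
  · apply List.map_congr_left
    intro t ht
    rw [PySem.List.mem_pyRange_one] at ht
    simp [ht.2]
  · have hdrop : ((PySem.List.pyRange 0 L0 1).map ascL).dropLast
        = (PySem.List.pyRange 0 (L0 - 1) 1).map ascL := by
      rw [show L0 = (L0 - 1) + 1 from by ring,
        PySem.List.pyRange_one_succ_right (by omega : (0:Int) ≤ L0 - 1)]
      simp
    rw [hdrop]
    have hmem : ∀ t ∈ PySem.List.pyRange L0 (2 * L0 - 1) 1, ¬ (t < L0) := by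
      intro t ht
      rw [PySem.List.mem_pyRange_one] at ht
      omega
    rw [List.map_congr_left (fun t ht => by simp [hmem t ht] :
      ∀ t ∈ PySem.List.pyRange L0 (2 * L0 - 1) 1,
        (fun t => ascL (if t < L0 then t else 2 * L0 - 2 - t)) t = (fun t => ascL (2 * L0 - 2 - t)) t)]
    have := map_reflect ascL (L0 - 1).toNat L0 (2 * L0 - 2)
    rw [show L0 + (((L0 - 1).toNat : Nat) : Int) = 2 * L0 - 1 from by omega] at this
    rw [show 2 * L0 - 2 - L0 - (((L0 - 1).toNat : Nat) : Int) + 1 = 0 from by omega,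
      show 2 * L0 - 2 - L0 + 1 = L0 - 1 from by omega] at this
    exact this

theorem Pyramidal_Order_RBS_gates_spec : Claim_equal_Pyramidal_Order_RBS_gates := by
  intro n f _
  unfold Spec_Pyramidal_Order_RBS_gates Pyramidal_Order_RBS_gates Pyramidal_Order_RBS_gates_alt
  dsimp only
  rw [pyRange_toNat (PySem.Int.floordiv n 2)]
  rw [phase1 n f ((PySem.Int.floordiv n 2).toNat)]
  by_cases hm : PySem.Int.floordiv n 2 ≤ 0
  · -- degenerate: no layers on either side
    rw [if_pos hm]
    rw [show ((PySem.Int.floordiv n 2).toNat : Int) = 0 from by omega,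
      PySem.List.pyRange_one_eq_nil (by omega : (0:Int) ≤ 0)]
    simp only [List.foldl_nil]
    simp [numberFrom, totLen, PySem.List.pyRange_neg_one_eq_nil (by omega : (-2:Int) ≤ -1)]
  · rw [if_neg hm]
    set L0 := if PySem.Int.mod n 2 == 0 then 2 * PySem.Int.floordiv n 2 - 1
        else 2 * PySem.Int.floordiv n 2 with hL0def
    have hL0 : 1 ≤ L0 := by
      rw [hL0def]
      split <;> omega
    rw [base_eq n (PySem.Int.floordiv n 2) rfl (by omega) L0 hL0def]
    set base := (PySem.List.pyRange 0 L0 1).map ascL with hbase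
    have hmem : ∀ i ∈ PySem.List.pyRange ((base.length : Int) - 2) (-1) (-1),
        0 ≤ i ∧ i < (base.length : Int) := by
      intro i hi
      rw [PySem.List.mem_pyRange_neg_one] at hi
      omega
    have h2 := phase2 base (PySem.List.pyRange ((base.length : Int) - 2) (-1) (-1)) hmem []
        (numberFrom f base) (f + totLen base)
    rw [List.append_nil] at h2
    rw [h2, mirror_map, ← numberFrom_append]
    have hts : ∀ t ∈ PySem.List.pyRange 0 (2 * L0 - 1) 1,
        0 ≤ (if t < L0 then t else 2 * L0 - 2 - t) := by
      intro t ht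
      rw [PySem.List.mem_pyRange_one] at ht
      split <;> omega
    rw [B_fold L0 (PySem.List.pyRange 0 (2 * L0 - 1) 1) hts [] [] f]
    rw [layers_split L0 hL0]
    rfl
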